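-- pv_equiv track=rewrite | github.com/Anmol-Sri/Competitive-Environment | CodeChef April20A/rebit_2.py | Calc_xor
-- ===== SOURCE A (Python) =====
-- MOD=998244353
--
-- def Calc_xor(a,b):
-- 	store=[]
-- 	ans=[0 for i in range(4)]
-- 	term1 = (a[0]*b[0])%MOD
-- 	term2 = (a[1]*b[1])%MOD
-- 	term3 = (a[2]*b[2])%MOD
-- 	term4 = (a[3]*b[3])%MOD
-- 	store = term1
-- 	store = (store+term2)%MOD
-- 	store = (store+term3)%MOD
-- 	store = (store+term4)%MOD
-- 	ans[0] = store
-- 	term1 = (a[0]*b[1])%MOD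
-- 	term2 = (a[1]*b[0])%MOD
-- 	term3 = (a[2]*b[3])%MOD
-- 	term4 = (a[3]*b[2])%MOD
-- 	store = term1
-- 	store = (store+term2)%MOD
-- 	store = (store+term3)%MOD
-- 	store = (store+term4)%MOD
-- 	ans[1] = store
-- 	term1 = (a[0]*b[2])%MOD
-- 	term2 = (a[1]*b[3])%MOD
-- 	term3 = (a[2]*b[0])%MOD
-- 	term4 = (a[3]*b[1])%MOD
-- 	store = term1
-- 	store = (store+term2)%MOD
-- 	store = (store+term3)%MOD
-- 	store = (store+term4)%MOD
-- 	ans[2] = store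
-- 	term1 = (a[0]*b[3])%MOD
-- 	term2 = (a[1]*b[2])%MOD
-- 	term3 = (a[2]*b[1])%MOD
-- 	term4 = (a[3]*b[0])%MOD
-- 	store = term1
-- 	store = (store+term2)%MOD
-- 	store = (store+term3)%MOD
-- 	store = (store+term4)%MOD
-- 	ans[3] = store
-- 	return ans
-- ===== SOURCE B (Python) =====
-- MOD = 998244353
--
-- def _wht4(x):
--     # 4-point Walsh-Hadamard transform (two butterfly stages)
--     s0, d0 = x[0] + x[1], x[0] - x[1]
--     s1, d1 = x[2] + x[3], x[2] - x[3]
--     return [s0 + s1, d0 + d1, s0 - s1, d0 - d1]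
--
-- def Calc_xor(a, b):
--     fa = _wht4(a)
--     fb = _wht4(b)
--     c = _wht4([fa[i] * fb[i] for i in range(4)])
--     # each entry of c is exactly 4 * (xor-convolution bucket), so //4 is exact
--     return [(v // 4) % MOD for v in c]
-- ===== Notes on version B (the rewrite author's own statement) =====
-- stated objective: alternative
-- what changed: Computes the 4-point Walsh-Hadamard transform of a and b, multiplies pointwise, transforms back and divides by 4 (exact), instead of summing the 16 hard-coded index-pair products.
import Mathlib
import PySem

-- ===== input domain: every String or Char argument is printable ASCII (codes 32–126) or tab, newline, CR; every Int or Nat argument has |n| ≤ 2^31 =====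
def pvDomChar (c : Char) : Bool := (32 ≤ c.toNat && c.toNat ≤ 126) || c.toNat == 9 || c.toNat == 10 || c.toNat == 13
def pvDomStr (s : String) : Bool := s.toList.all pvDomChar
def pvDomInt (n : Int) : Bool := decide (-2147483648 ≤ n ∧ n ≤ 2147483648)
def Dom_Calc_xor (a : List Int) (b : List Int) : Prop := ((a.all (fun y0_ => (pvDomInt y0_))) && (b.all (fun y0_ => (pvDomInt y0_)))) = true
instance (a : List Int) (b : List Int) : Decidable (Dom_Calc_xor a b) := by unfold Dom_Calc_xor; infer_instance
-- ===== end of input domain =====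

-- B computes the product via the 4-point Walsh–Hadamard transform (transform, pointwise multiply,
-- inverse transform with an exact //4) instead of A's 16 unrolled index-pair products (objective: alternative).

def pvMOD : Int := 998244353

-- ===== PORT A =====
-- Literal transliteration of A: four unrolled blocks, each computing term1..term4
-- pre-reduced mod p and folding them into `store`, then assigning ans[i].
-- pyGetD/pySetD are total stand-ins for a[i]/ans[i]=…; Pre_ keeps the indices in range.
def Calc_xor (a : List Int) (b : List Int) : List Int :=
  let ans := List.replicate 4 (0 : Int)
  let term1 := PySem.Int.mod (PySem.List.pyGetD a 0 0 * PySem.List.pyGetD b 0 0) pvMOD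
  let term2 := PySem.Int.mod (PySem.List.pyGetD a 1 0 * PySem.List.pyGetD b 1 0) pvMOD
  let term3 := PySem.Int.mod (PySem.List.pyGetD a 2 0 * PySem.List.pyGetD b 2 0) pvMOD
  let term4 := PySem.Int.mod (PySem.List.pyGetD a 3 0 * PySem.List.pyGetD b 3 0) pvMOD
  let store := term1
  let store := PySem.Int.mod (store + term2) pvMOD
  let store := PySem.Int.mod (store + term3) pvMOD
  let store := PySem.Int.mod (store + term4) pvMOD
  let ans := PySem.List.pySetD ans 0 store
  let term1 := PySem.Int.mod (PySem.List.pyGetD a 0 0 * PySem.List.pyGetD b 1 0) pvMOD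
  let term2 := PySem.Int.mod (PySem.List.pyGetD a 1 0 * PySem.List.pyGetD b 0 0) pvMOD
  let term3 := PySem.Int.mod (PySem.List.pyGetD a 2 0 * PySem.List.pyGetD b 3 0) pvMOD
  let term4 := PySem.Int.mod (PySem.List.pyGetD a 3 0 * PySem.List.pyGetD b 2 0) pvMOD
  let store := term1
  let store := PySem.Int.mod (store + term2) pvMOD
  let store := PySem.Int.mod (store + term3) pvMOD
  let store := PySem.Int.mod (store + term4) pvMOD
  let ans := PySem.List.pySetD ans 1 store
  let term1 := PySem.Int.mod (PySem.List.pyGetD a 0 0 * PySem.List.pyGetD b 2 0) pvMOD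
  let term2 := PySem.Int.mod (PySem.List.pyGetD a 1 0 * PySem.List.pyGetD b 3 0) pvMOD
  let term3 := PySem.Int.mod (PySem.List.pyGetD a 2 0 * PySem.List.pyGetD b 0 0) pvMOD
  let term4 := PySem.Int.mod (PySem.List.pyGetD a 3 0 * PySem.List.pyGetD b 1 0) pvMOD
  let store := term1
  let store := PySem.Int.mod (store + term2) pvMOD
  let store := PySem.Int.mod (store + term3) pvMOD
  let store := PySem.Int.mod (store + term4) pvMOD
  let ans := PySem.List.pySetD ans 2 store
  let term1 := PySem.Int.mod (PySem.List.pyGetD a 0 0 * PySem.List.pyGetD b 3 0) pvMOD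
  let term2 := PySem.Int.mod (PySem.List.pyGetD a 1 0 * PySem.List.pyGetD b 2 0) pvMOD
  let term3 := PySem.Int.mod (PySem.List.pyGetD a 2 0 * PySem.List.pyGetD b 1 0) pvMOD
  let term4 := PySem.Int.mod (PySem.List.pyGetD a 3 0 * PySem.List.pyGetD b 0 0) pvMOD
  let store := term1
  let store := PySem.Int.mod (store + term2) pvMOD
  let store := PySem.Int.mod (store + term3) pvMOD
  let store := PySem.Int.mod (store + term4) pvMOD
  let ans := PySem.List.pySetD ans 3 store
  ans

-- ===== PORT B =====
-- Literal transliteration of B's helper _wht4: two butterfly stages of the 4-point WHT.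
def pvWht4 (x : List Int) : List Int :=
  let s0 := PySem.List.pyGetD x 0 0 + PySem.List.pyGetD x 1 0
  let d0 := PySem.List.pyGetD x 0 0 - PySem.List.pyGetD x 1 0
  let s1 := PySem.List.pyGetD x 2 0 + PySem.List.pyGetD x 3 0
  let d1 := PySem.List.pyGetD x 2 0 - PySem.List.pyGetD x 3 0
  [s0 + s1, d0 + d1, s0 - s1, d0 - d1]

-- Literal transliteration of B: fa = _wht4(a); fb = _wht4(b); c = _wht4(pointwise products);
-- return [(v // 4) % MOD for v in c].
def Calc_xor_alt (a : List Int) (b : List Int) : List Int :=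
  let fa := pvWht4 a
  let fb := pvWht4 b
  let c := pvWht4 ((PySem.List.pyRange 0 4 1).map
    (fun i => PySem.List.pyGetD fa i 0 * PySem.List.pyGetD fb i 0))
  c.map (fun v => PySem.Int.mod (PySem.Int.floordiv v 4) pvMOD)

-- ===== PRECONDITION & SPEC =====
-- A (and B) raise IndexError unless both lists have at least 4 elements.
def Pre_Calc_xor (a : List Int) (b : List Int) : Prop := 4 ≤ a.length ∧ 4 ≤ b.length
instance (a : List Int) (b : List Int) : Decidable (Pre_Calc_xor a b) := by unfold Pre_Calc_xor; infer_instance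
def pvWitness_Calc_xor : List Int × List Int := ([1, 2, 3, 4], [5, 6, 7, 8])

def Spec_Calc_xor (a : List Int) (b : List Int) (out : List Int) : Prop := out = Calc_xor_alt a b
instance (a : List Int) (b : List Int) (out : List Int) : Decidable (Spec_Calc_xor a b out) := by unfold Spec_Calc_xor; infer_instance

-- ===== CLAIM (what is proved, stated in full; the proofs are below) =====
def Claim_equal_Calc_xor : Prop := ∀ (a : List Int) (b : List Int), Dom_Calc_xor a b → Pre_Calc_xor a b → Spec_Calc_xor a b (Calc_xor a b)

-- ===== LEMMAS AND PROOFS =====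

-- pvMOD is positive, so Python's % here is Int.emod; lets `omega` read the mod chains.
theorem pvmod_eq (x : Int) : PySem.Int.mod x pvMOD = x % 998244353 := by
  rw [show pvMOD = (998244353 : Int) from rfl, PySem.Int.mod_eq_emod_of_pos (by norm_num)]

theorem pyGetD_cons4 (x0 x1 x2 x3 : Int) (xs : List Int) :
    PySem.List.pyGetD (x0 :: x1 :: x2 :: x3 :: xs) 0 0 = x0 ∧
    PySem.List.pyGetD (x0 :: x1 :: x2 :: x3 :: xs) 1 0 = x1 ∧
    PySem.List.pyGetD (x0 :: x1 :: x2 :: x3 :: xs) 2 0 = x2 ∧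
    PySem.List.pyGetD (x0 :: x1 :: x2 :: x3 :: xs) 3 0 = x3 := by
  refine ⟨?_, ?_, ?_, ?_⟩ <;>
    (simp [PySem.List.pyGetD, PySem.List.pyGet?, PySem.List.pyIdx?];
     rw [if_pos (by omega)]; simp)

theorem pvWht4_cons4 (x0 x1 x2 x3 : Int) (xs : List Int) :
    pvWht4 (x0 :: x1 :: x2 :: x3 :: xs) =
      [(x0 + x1) + (x2 + x3), (x0 - x1) + (x2 - x3),
       (x0 + x1) - (x2 + x3), (x0 - x1) - (x2 - x3)] := by
  obtain ⟨h0, h1, h2, h3⟩ := pyGetD_cons4 x0 x1 x2 x3 xs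
  simp only [pvWht4, h0, h1, h2, h3]

theorem floordiv_four_mul (s : Int) : PySem.Int.floordiv (4 * s) 4 = s := by
  rw [PySem.Int.floordiv_eq_ediv_of_pos (by norm_num)]
  exact Int.mul_ediv_cancel_left s (by norm_num)

theorem Calc_xor_eq_alt (a0 a1 a2 a3 b0 b1 b2 b3 : Int) (as bs : List Int) :
    Calc_xor (a0 :: a1 :: a2 :: a3 :: as) (b0 :: b1 :: b2 :: b3 :: bs) =
      Calc_xor_alt (a0 :: a1 :: a2 :: a3 :: as) (b0 :: b1 :: b2 :: b3 :: bs) := by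
  obtain ⟨ha0, ha1, ha2, ha3⟩ := pyGetD_cons4 a0 a1 a2 a3 as
  obtain ⟨hb0, hb1, hb2, hb3⟩ := pyGetD_cons4 b0 b1 b2 b3 bs
  -- evaluate B's side down to the four exact bucket sums
  have hmap : (PySem.List.pyRange 0 4 1).map
      (fun i => PySem.List.pyGetD (pvWht4 (a0 :: a1 :: a2 :: a3 :: as)) i 0 *
                PySem.List.pyGetD (pvWht4 (b0 :: b1 :: b2 :: b3 :: bs)) i 0) =
      [((a0 + a1) + (a2 + a3)) * ((b0 + b1) + (b2 + b3)),
       ((a0 - a1) + (a2 - a3)) * ((b0 - b1) + (b2 - b3)),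
       ((a0 + a1) - (a2 + a3)) * ((b0 + b1) - (b2 + b3)),
       ((a0 - a1) - (a2 - a3)) * ((b0 - b1) - (b2 - b3))] := by
    rw [pvWht4_cons4, pvWht4_cons4,
        show PySem.List.pyRange 0 4 1 = [0, 1, 2, 3] from by decide]
    simp only [List.map]
    obtain ⟨g0, g1, g2, g3⟩ := pyGetD_cons4 ((a0 + a1) + (a2 + a3)) ((a0 - a1) + (a2 - a3))
      ((a0 + a1) - (a2 + a3)) ((a0 - a1) - (a2 - a3)) []
    obtain ⟨k0, k1, k2, k3⟩ := pyGetD_cons4 ((b0 + b1) + (b2 + b3)) ((b0 - b1) + (b2 - b3))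
      ((b0 + b1) - (b2 + b3)) ((b0 - b1) - (b2 - b3)) []
    rw [g0, g1, g2, g3, k0, k1, k2, k3]
  have halt : Calc_xor_alt (a0 :: a1 :: a2 :: a3 :: as) (b0 :: b1 :: b2 :: b3 :: bs) =
      [(a0 * b0 + a1 * b1 + a2 * b2 + a3 * b3) % 998244353,
       (a0 * b1 + a1 * b0 + a2 * b3 + a3 * b2) % 998244353,
       (a0 * b2 + a1 * b3 + a2 * b0 + a3 * b1) % 998244353,
       (a0 * b3 + a1 * b2 + a2 * b1 + a3 * b0) % 998244353] := by
    simp only [Calc_xor_alt]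
    rw [hmap, pvWht4_cons4]
    simp only [List.map]
    rw [show (((a0 + a1) + (a2 + a3)) * ((b0 + b1) + (b2 + b3)) +
             ((a0 - a1) + (a2 - a3)) * ((b0 - b1) + (b2 - b3))) +
            (((a0 + a1) - (a2 + a3)) * ((b0 + b1) - (b2 + b3)) +
             ((a0 - a1) - (a2 - a3)) * ((b0 - b1) - (b2 - b3))) =
          4 * (a0 * b0 + a1 * b1 + a2 * b2 + a3 * b3) from by ring,
        show (((a0 + a1) + (a2 + a3)) * ((b0 + b1) + (b2 + b3)) -
             ((a0 - a1) + (a2 - a3)) * ((b0 - b1) + (b2 - b3))) +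
            (((a0 + a1) - (a2 + a3)) * ((b0 + b1) - (b2 + b3)) -
             ((a0 - a1) - (a2 - a3)) * ((b0 - b1) - (b2 - b3))) =
          4 * (a0 * b1 + a1 * b0 + a2 * b3 + a3 * b2) from by ring,
        show (((a0 + a1) + (a2 + a3)) * ((b0 + b1) + (b2 + b3)) +
             ((a0 - a1) + (a2 - a3)) * ((b0 - b1) + (b2 - b3))) -
            (((a0 + a1) - (a2 + a3)) * ((b0 + b1) - (b2 + b3)) +
             ((a0 - a1) - (a2 - a3)) * ((b0 - b1) - (b2 - b3))) =
          4 * (a0 * b2 + a1 * b3 + a2 * b0 + a3 * b1) from by ring,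
        show (((a0 + a1) + (a2 + a3)) * ((b0 + b1) + (b2 + b3)) -
             ((a0 - a1) + (a2 - a3)) * ((b0 - b1) + (b2 - b3))) -
            (((a0 + a1) - (a2 + a3)) * ((b0 + b1) - (b2 + b3)) -
             ((a0 - a1) - (a2 - a3)) * ((b0 - b1) - (b2 - b3))) =
          4 * (a0 * b3 + a1 * b2 + a2 * b1 + a3 * b0) from by ring,
        floordiv_four_mul, floordiv_four_mul, floordiv_four_mul, floordiv_four_mul,
        pvmod_eq, pvmod_eq, pvmod_eq, pvmod_eq]
  rw [halt]
  simp only [Calc_xor, ha0, ha1, ha2, ha3, hb0, hb1, hb2, hb3]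
  simp only [List.replicate]
  simp [PySem.List.pySetD, PySem.List.pySet?, PySem.List.pyIdx?]
  simp only [pvmod_eq]
  refine ⟨?_, ?_, ?_, ?_⟩ <;>
    (generalize a0 * b0 = p00; generalize a0 * b1 = p01; generalize a0 * b2 = p02;
     generalize a0 * b3 = p03; generalize a1 * b0 = p10; generalize a1 * b1 = p11;
     generalize a1 * b2 = p12; generalize a1 * b3 = p13; generalize a2 * b0 = p20;
     generalize a2 * b1 = p21; generalize a2 * b2 = p22; generalize a2 * b3 = p23;
     generalize a3 * b0 = p30; generalize a3 * b1 = p31; generalize a3 * b2 = p32;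
     generalize a3 * b3 = p33; omega)

-- ===== VERDICT (by name: the statement is the Claim_ definition above) =====
theorem Calc_xor_spec : Claim_equal_Calc_xor := by
  intro a b _ hpre
  obtain ⟨ha, hb⟩ := hpre
  match a, ha, b, hb with
  | a0 :: a1 :: a2 :: a3 :: as, _, b0 :: b1 :: b2 :: b3 :: bs, _ =>
    exact (Calc_xor_eq_alt a0 a1 a2 a3 b0 b1 b2 b3 as bs).symm ▸ rfl
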